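-- pv_equiv track=rewrite | github.com/luochenghuajin/doudizhu | action_generator.py | CombinationsByIndex
-- ===== SOURCE A (Python) =====
-- from typing import List, Dict, Tuple
--
-- def CombinationsByIndex(A: List, k: int) -> List[List[int]]:
--     result: List[List[int]] = []
--     cur: List[int] = []
--
--     def dfs(start: int, remain: int):
--         if remain == 0:
--             result.append(list(cur))
--             return
--         for i in range(start, len(A) - remain + 1):
--             cur.append(i)
--             dfs(i + 1, remain - 1)
--             cur.pop()
--
--     if k <= len(A) and k >= 0:
--         dfs(0, k)
--     return result
-- ===== SOURCE B (Python) =====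
-- def CombinationsByIndex(A, k):
--     n = len(A)
--     if not (0 <= k <= n):
--         return []
--     c = list(range(k))
--     result = []
--     while True:
--         result.append(list(c))
--         i = k - 1
--         while i >= 0 and c[i] >= n - k + i:
--             i -= 1
--         if i < 0:
--             return result
--         c[i] += 1
--         for j in range(i + 1, k):
--             c[j] = c[j - 1] + 1
-- ===== Notes on version B (the rewrite author's own statement) =====
-- stated objective: alternative
-- what changed: Replaced the recursive DFS with shared cur/result accumulators by an iterative odometer that keeps one current index array and advances it in place to the next lexicographic combination.
import Mathlib
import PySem

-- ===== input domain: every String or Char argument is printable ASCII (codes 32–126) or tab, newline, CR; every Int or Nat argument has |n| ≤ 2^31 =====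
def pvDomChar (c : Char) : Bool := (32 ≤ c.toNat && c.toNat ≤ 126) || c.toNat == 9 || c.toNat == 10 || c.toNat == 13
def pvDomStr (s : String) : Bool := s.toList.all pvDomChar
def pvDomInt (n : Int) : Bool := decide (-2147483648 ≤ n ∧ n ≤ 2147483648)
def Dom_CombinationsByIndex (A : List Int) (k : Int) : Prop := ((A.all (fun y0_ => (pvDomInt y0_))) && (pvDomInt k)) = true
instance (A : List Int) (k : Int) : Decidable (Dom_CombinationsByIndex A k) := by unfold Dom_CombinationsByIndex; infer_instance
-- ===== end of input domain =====

-- B replaces A's recursive DFS (shared cur/result accumulators) by an iterative odometer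
-- advancing one current index array in place; same values in the same lexicographic order.

-- ===== PORT A =====
-- A's inner 'dfs(start, remain)': remain is k counted down to 0 (k ≥ 0 is guarded at the
-- call site), so it is ported with remain : Nat as the recursion measure; the shared
-- 'result'/'cur' accumulators become the returned list and the cur parameter.
def pvDfsA (A : List Int) : Nat → Int → List Int → List (List Int)
  | 0, _start, cur => [cur]
  | r + 1, start, cur =>
      (PySem.List.pyRange start ((A.length : Int) - ((r : Int) + 1) + 1) 1).foldl
        (fun res i => res ++ pvDfsA A r (i + 1) (cur ++ [i])) []

def CombinationsByIndex (A : List Int) (k : Int) : List (List Int) :=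
  if k ≤ (A.length : Int) ∧ 0 ≤ k then pvDfsA A k.toNat 0 [] else []

-- ===== PORT B =====
-- Source B's inner scan 'i = k-1; while i >= 0 and c[i] >= n-k+i: i -= 1' searches the
-- rightmost incrementable position; ported structurally: try the tail first, and only if
-- the tail has no successor test the head (the bound of a position with m trailing slots
-- is n - m - 1).  The reset loop 'for j in range(i+1,k): c[j] = c[j-1]+1' is the
-- consecutive run pyRange (x+2) (x+2+|rest|).
def pvOdoNext (n : Int) : List Int → Option (List Int)
  | [] => none
  | x :: rest =>
      match pvOdoNext n rest with
      | some r' => some (x :: r')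
      | none =>
          if x < n - (rest.length : Int) - 1 then
            some ((x + 1) :: PySem.List.pyRange (x + 2) (x + 2 + (rest.length : Int)) 1)
          else none

-- the 'while True' loop; fuel is a totality guard only, never exhausted (proved below)
def pvOdoEmit (n : Int) : Nat → List Int → List (List Int) → List (List Int)
  | 0, _c, res => res
  | f + 1, c, res =>
      match pvOdoNext n c with
      | none => res ++ [c]
      | some c' => pvOdoEmit n f c' (res ++ [c])

def CombinationsByIndex_alt (A : List Int) (k : Int) : List (List Int) :=
  if 0 ≤ k ∧ k ≤ (A.length : Int) then
    pvOdoEmit (A.length : Int) ((A.length + 1) ^ k.toNat + 1)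
      (PySem.List.pyRange 0 k 1) []
  else []

-- ===== PRECONDITION & SPEC =====
def Spec_CombinationsByIndex (A : List Int) (k : Int) (out : List (List Int)) : Prop := out = CombinationsByIndex_alt A k
instance (A : List Int) (k : Int) (out : List (List Int)) : Decidable (Spec_CombinationsByIndex A k out) := by unfold Spec_CombinationsByIndex; infer_instance

-- ===== CLAIM (what is proved, stated in full; the proofs are below) =====
def Claim_equal_CombinationsByIndex : Prop := ∀ (A : List Int) (k : Int), Dom_CombinationsByIndex A k → Spec_CombinationsByIndex A k (CombinationsByIndex A k)

-- ===== LEMMAS AND PROOFS =====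

-- the common specification: pvS n lo k = the k-element increasing index lists drawn from
-- [lo, n), in lexicographic order (a position with m trailing slots is bounded by n-m-1)
def pvS (n : Int) (lo : Int) : Nat → List (List Int)
  | 0 => [[]]
  | k + 1 =>
      (PySem.List.pyRange lo (n - (k : Int)) 1).flatMap
        (fun i => (pvS n (i + 1) k).map (i :: ·))

-- lexicographic tail: all combinations ≥ c (c's own suffix first, then fresh larger heads)
def pvT (n : Int) : List Int → List (List Int)
  | [] => [[]]
  | x :: rest =>
      (pvT n rest).map (x :: ·) ++
        (PySem.List.pyRange (x + 1) (n - (rest.length : Int)) 1).flatMap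
          (fun i => (pvS n (i + 1) rest.length).map (i :: ·))

theorem pvS_succ (n lo : Int) (k : Nat) :
    pvS n lo (k + 1)
      = (PySem.List.pyRange lo (n - (k : Int)) 1).flatMap
          (fun i => (pvS n (i + 1) k).map (i :: ·)) := rfl

theorem pvT_cons (n x : Int) (rest : List Int) :
    pvT n (x :: rest)
      = (pvT n rest).map (x :: ·) ++
          (PySem.List.pyRange (x + 1) (n - (rest.length : Int)) 1).flatMap
            (fun i => (pvS n (i + 1) rest.length).map (i :: ·)) := rfl

theorem pvT_ne_nil (n : Int) (c : List Int) : pvT n c ≠ [] := by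
  cases c with
  | nil => simp [pvT]
  | cons x rest => simp [pvT, pvT_ne_nil n rest]

theorem pvNext_length (n : Int) (c c' : List Int)
    (h : pvOdoNext n c = some c') : c'.length = c.length := by
  induction c generalizing c' with
  | nil => simp [pvOdoNext] at h
  | cons x rest ih =>
    unfold pvOdoNext at h
    cases hr : pvOdoNext n rest with
    | some r' =>
      rw [hr] at h
      simp at h
      subst h
      simp [ih r' hr]
    | none =>
      rw [hr] at h
      by_cases hx : x < n - (rest.length : Int) - 1
      · rw [if_pos hx] at h
        simp at h
        subst h
        simp [PySem.List.length_pyRange_one]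
      · rw [if_neg hx] at h
        simp at h

-- first combination: pvT of the consecutive run [lo, lo+k) is all of pvS n lo k
theorem pvT_init (n : Int) (k : Nat) (lo : Int) (h : lo + (k : Int) ≤ n) :
    pvT n (PySem.List.pyRange lo (lo + (k : Int)) 1) = pvS n lo k := by
  induction k generalizing lo with
  | zero => simp [PySem.List.pyRange_one_eq_nil, pvT, pvS]
  | succ k ih =>
    have hcast : ((k + 1 : Nat) : Int) = (k : Int) + 1 := by push_cast; ring
    rw [hcast] at h ⊢
    rw [PySem.List.pyRange_one_cons (show lo < lo + ((k : Int) + 1) by omega)]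
    have hlen : (PySem.List.pyRange (lo + 1) (lo + ((k : Int) + 1)) 1).length = k := by
      rw [PySem.List.length_pyRange_one]; omega
    rw [pvT_cons, hlen]
    have hrange : PySem.List.pyRange (lo + 1) (lo + ((k:Int)+1)) 1
        = PySem.List.pyRange (lo + 1) ((lo + 1) + (k:Int)) 1 := by ring_nf
    rw [hrange, ih (lo+1) (by omega)]
    rw [pvS_succ, PySem.List.pyRange_one_cons (show lo < n - (k:Int) by omega),
      List.flatMap_cons]

-- successor step: next is the lexicographic-successor operation w.r.t. pvT
theorem pvT_step (n : Int) (c : List Int) :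
    (∀ c', pvOdoNext n c = some c' → pvT n c = c :: pvT n c') ∧
    (pvOdoNext n c = none → pvT n c = [c]) := by
  induction c with
  | nil =>
    constructor
    · intro c' h; simp [pvOdoNext] at h
    · intro _; simp [pvT]
  | cons x rest ih =>
    constructor
    · intro c' h
      unfold pvOdoNext at h
      cases hr : pvOdoNext n rest with
      | some r' =>
        rw [hr] at h; simp at h; subst h
        have hT := ih.1 r' hr
        have hlen := pvNext_length n rest r' hr
        rw [pvT_cons, hT, pvT_cons n x r', hlen]
        simp
      | none =>
        rw [hr] at h
        by_cases hx : x < n - (rest.length : Int) - 1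
        · rw [if_pos hx] at h
          simp at h; subst h
          have hTrest := ih.2 hr
          have hlen' : (PySem.List.pyRange (x + 2) (x + 2 + (rest.length : Int)) 1).length
              = rest.length := by rw [PySem.List.length_pyRange_one]; omega
          rw [pvT_cons, hTrest, pvT_cons, hlen',
            pvT_init n rest.length (x + 2) (by omega),
            PySem.List.pyRange_one_cons
              (show x + 1 < n - (rest.length : Int) by omega),
            List.flatMap_cons,
            show x + 1 + 1 = x + 2 from by ring]
          simp
        · rw [if_neg hx] at h
          simp at h
    · intro h
      unfold pvOdoNext at h
      cases hr : pvOdoNext n rest with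
      | some r' => rw [hr] at h; simp at h
      | none =>
        rw [hr] at h
        by_cases hx : x < n - (rest.length : Int) - 1
        · rw [if_pos hx] at h
          simp at h
        · have hTrest := ih.2 hr
          rw [pvT_cons, hTrest,
            PySem.List.pyRange_one_eq_nil (show n - (rest.length:Int) ≤ x + 1 by omega)]
          simp

-- the emit loop with sufficient fuel produces exactly the tail list pvT
theorem pvEmit_eq (n : Int) (f : Nat) (c : List Int) (res : List (List Int))
    (hf : (pvT n c).length ≤ f) :
    pvOdoEmit n f c res = res ++ pvT n c := by
  induction f generalizing c res with
  | zero =>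
    exfalso
    have h1 : 0 < (pvT n c).length := List.length_pos_iff.mpr (pvT_ne_nil n c)
    omega
  | succ f ih =>
    unfold pvOdoEmit
    cases hn : pvOdoNext n c with
    | none =>
      show res ++ [c] = res ++ pvT n c
      rw [(pvT_step n c).2 hn]
    | some c' =>
      have hT := (pvT_step n c).1 c' hn
      have hlen : (pvT n c').length ≤ f := by
        rw [hT] at hf; simp at hf; omega
      show pvOdoEmit n f c' (res ++ [c]) = res ++ pvT n c
      rw [ih c' (res ++ [c]) hlen, hT]
      simp

-- size bound making the fuel in the port sufficient
theorem pvS_length_le (n : Int) (k : Nat) (lo : Int) (hlo : 0 ≤ lo) :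
    (pvS n lo k).length ≤ (n.toNat + 1) ^ k := by
  induction k generalizing lo with
  | zero => simp [pvS]
  | succ k ih =>
    unfold pvS
    rw [List.length_flatMap]
    calc ((PySem.List.pyRange lo (n - (k:Int)) 1).map
            (fun i => ((pvS n (i+1) k).map (i :: ·)).length)).sum
        ≤ ((PySem.List.pyRange lo (n - (k:Int)) 1).map
            (fun _ => (n.toNat + 1) ^ k)).sum := by
          apply List.sum_le_sum
          intro i hi
          rw [PySem.List.mem_pyRange_one] at hi
          rw [List.length_map]
          exact ih (i+1) (by omega)
      _ = (PySem.List.pyRange lo (n - (k:Int)) 1).length * (n.toNat + 1) ^ k := by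
          rw [List.map_const', List.sum_replicate, smul_eq_mul]
      _ ≤ (n.toNat + 1) * (n.toNat + 1) ^ k := by
          apply Nat.mul_le_mul_right
          rw [PySem.List.length_pyRange_one]
          omega
      _ = (n.toNat + 1) ^ (k + 1) := by ring

-- A's dfs computes pvS (with the cur prefix distributed over the result)
theorem pvDfs_eq (A : List Int) (r : Nat) (start : Int) (cur : List Int) :
    pvDfsA A r start cur = (pvS (A.length : Int) start r).map (cur ++ ·) := by
  induction r generalizing start cur with
  | zero => simp [pvDfsA, pvS]
  | succ r ih =>
    unfold pvDfsA
    show _ = (pvS (A.length : Int) start (r+1)).map (cur ++ ·)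
    unfold pvS
    have harg : (A.length : Int) - ((r : Int) + 1) + 1 = (A.length : Int) - (r : Int) := by
      ring
    rw [harg, PySem.List.foldl_append_eq_flatMap, List.map_flatMap]
    have hfun : (fun i => pvDfsA A r (i + 1) (cur ++ [i]))
        = fun i => ((pvS (A.length : Int) (i+1) r).map (i :: ·)).map (cur ++ ·) := by
      funext i
      rw [ih]
      rw [List.map_map]
      congr 1
      funext l
      simp
    rw [hfun]
    simp

-- ===== VERDICT (by name: the statement is the Claim_ definition above) =====
theorem CombinationsByIndex_spec : Claim_equal_CombinationsByIndex := by
  intro A k _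
  unfold Spec_CombinationsByIndex CombinationsByIndex CombinationsByIndex_alt
  by_cases h : 0 ≤ k ∧ k ≤ (A.length : Int)
  · rw [if_pos ⟨h.2, h.1⟩, if_pos h]
    have hk : ((k.toNat : Nat) : Int) = k := Int.toNat_of_nonneg h.1
    have hinitc : PySem.List.pyRange 0 k 1
        = PySem.List.pyRange 0 (0 + ((k.toNat : Nat) : Int)) 1 := by
      rw [hk]; ring_nf
    have hT0 : pvT (A.length : Int) (PySem.List.pyRange 0 k 1)
        = pvS (A.length : Int) 0 k.toNat := by
      rw [hinitc]
      exact pvT_init (A.length : Int) k.toNat 0 (by omega)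
    have hfuel : (pvT (A.length : Int) (PySem.List.pyRange 0 k 1)).length
        ≤ (A.length + 1) ^ k.toNat + 1 := by
      rw [hT0]
      have := pvS_length_le (A.length : Int) k.toNat 0 (by omega)
      simp only [Int.toNat_natCast] at this
      omega
    rw [pvEmit_eq _ _ _ _ hfuel, hT0, pvDfs_eq]
    simp
  · rw [if_neg (fun hc => h ⟨hc.2, hc.1⟩), if_neg h]
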